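-- pv_equiv track=rewrite | github.com/loganv90/aoc-2015-python | day15/solution.py | get_best_score
-- ===== SOURCE A (Python) =====
-- def multiply_ingredient(ingredient: tuple[str, int, int, int, int, int], cap: int) -> tuple[str, int, int, int, int, int]:
--     name, capacity, durability, flavor, texture, calories = ingredient
--     return name, capacity * cap, durability * cap, flavor * cap, texture * cap, calories * cap
--
-- def score_ingredients(chosen_ingredients: list[tuple[str, int, int, int, int, int]]) -> tuple[int, int]:
--     capacity, durability, flavor, texture, calories = 0, 0, 0, 0, 0
--     for ingredient in chosen_ingredients:
--         _, cap, dur, flav, text, cal = ingredient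
--         capacity += cap
--         durability += dur
--         flavor += flav
--         texture += text
--         calories += cal
--
--     if capacity < 0 or durability < 0 or flavor < 0 or texture < 0:
--         return 0, calories
--     return capacity * durability * flavor * texture, calories
--
-- def get_best_score(ingredients: list[tuple[str, int, int, int, int, int]], cal_spec=False) -> int:
--     best_score = 0
--     cap = 100
--     for i in range(0, cap+1):
--         for j in range(0, cap+1-i):
--             for k in range(0, cap+1-i-j):
--                 l = cap - i - j - k
--
--                 ingredient_0 = multiply_ingredient(ingredients[0], i)
--                 ingredient_1 = multiply_ingredient(ingredients[1], j)
--                 ingredient_2 = multiply_ingredient(ingredients[2], k)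
--                 ingredient_3 = multiply_ingredient(ingredients[3], l)
--
--                 score, calories = score_ingredients([ingredient_0, ingredient_1, ingredient_2, ingredient_3])
--                 if cal_spec and calories != 500:
--                     continue
--                 if score > best_score:
--                     best_score = score
--     return best_score
-- ===== SOURCE B (Python) =====
-- def get_best_score(ingredients: list[tuple[str, int, int, int, int, int]], cal_spec=False) -> int:
--     def go(idx, remaining, capacity, durability, flavor, texture, calories, best):
--         _, c, d, f, t, k = ingredients[idx]
--         if idx >= 3:
--             capacity2 = capacity + c * remaining
--             durability2 = durability + d * remaining
--             flavor2 = flavor + f * remaining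
--             texture2 = texture + t * remaining
--             calories2 = calories + k * remaining
--             if cal_spec and calories2 != 500:
--                 return best
--             if capacity2 < 0 or durability2 < 0 or flavor2 < 0 or texture2 < 0:
--                 score = 0
--             else:
--                 score = capacity2 * durability2 * flavor2 * texture2
--             return score if score > best else best
--         for amt in range(remaining + 1):
--             best = go(idx + 1, remaining - amt,
--                       capacity + c * amt, durability + d * amt,
--                       flavor + f * amt, texture + t * amt,
--                       calories + k * amt, best)
--         return best
--     return go(0, 100, 0, 0, 0, 0, 0, 0)
-- ===== Notes on version B (the rewrite author's own statement) =====
-- stated objective: faster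
-- what changed: Replaces the triple nested loop that rebuilds four scaled ingredient tuples and re-sums them per point with a recursive budget-distribution over the four slots that carries the five accumulated attribute sums as parameters, so only the one new ingredient's contribution is added per step.
import Mathlib
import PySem

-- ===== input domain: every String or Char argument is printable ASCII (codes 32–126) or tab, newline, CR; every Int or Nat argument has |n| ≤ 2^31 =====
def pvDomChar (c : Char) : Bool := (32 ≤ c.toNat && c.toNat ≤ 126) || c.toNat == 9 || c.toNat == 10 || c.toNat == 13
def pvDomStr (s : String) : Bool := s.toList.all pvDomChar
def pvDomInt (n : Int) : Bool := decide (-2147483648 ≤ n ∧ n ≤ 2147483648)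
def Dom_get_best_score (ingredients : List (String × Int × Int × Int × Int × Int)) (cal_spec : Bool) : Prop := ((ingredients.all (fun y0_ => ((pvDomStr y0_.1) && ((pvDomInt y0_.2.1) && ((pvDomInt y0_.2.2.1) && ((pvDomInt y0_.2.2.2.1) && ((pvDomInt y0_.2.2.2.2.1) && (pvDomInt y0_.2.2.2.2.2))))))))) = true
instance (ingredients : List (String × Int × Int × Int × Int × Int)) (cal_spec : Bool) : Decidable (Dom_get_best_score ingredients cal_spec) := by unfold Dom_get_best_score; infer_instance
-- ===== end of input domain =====

-- B replaces A's triple nested loop (rebuilding and re-summing four scaled tuples per point)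
-- by a recursive distribution of the 100-unit budget over the four slots carrying accumulated
-- attribute sums; a timing run measured it faster by a constant factor.

-- ===== PORT A =====
def multiply_ingredient (ingredient : String × Int × Int × Int × Int × Int) (cap : Int) :
    String × Int × Int × Int × Int × Int :=
  let (name, capacity, durability, flavor, texture, calories) := ingredient
  (name, capacity * cap, durability * cap, flavor * cap, texture * cap, calories * cap)

def score_ingredients (chosen : List (String × Int × Int × Int × Int × Int)) : Int × Int :=
  let acc := chosen.foldl
    (fun (a : Int × Int × Int × Int × Int) ing =>
      (a.1 + ing.2.1, a.2.1 + ing.2.2.1, a.2.2.1 + ing.2.2.2.1,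
       a.2.2.2.1 + ing.2.2.2.2.1, a.2.2.2.2 + ing.2.2.2.2.2))
    (0, 0, 0, 0, 0)
  if acc.1 < 0 ∨ acc.2.1 < 0 ∨ acc.2.2.1 < 0 ∨ acc.2.2.2.1 < 0 then (0, acc.2.2.2.2)
  else (acc.1 * acc.2.1 * acc.2.2.1 * acc.2.2.2.1, acc.2.2.2.2)

def get_best_score (ingredients : List (String × Int × Int × Int × Int × Int)) (cal_spec : Bool) : Int :=
  let cap : Int := 100
  -- ingredients[idx] raises IndexError for short lists: excluded by Pre_; .getD is unreachable there
  let dflt : String × Int × Int × Int × Int × Int := ("", 0, 0, 0, 0, 0)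
  (PySem.List.pyRange 0 (cap + 1) 1).foldl
    (fun best_score i =>
      (PySem.List.pyRange 0 (cap + 1 - i) 1).foldl
        (fun best_score j =>
          (PySem.List.pyRange 0 (cap + 1 - i - j) 1).foldl
            (fun best_score k =>
              let l := cap - i - j - k
              let ingredient_0 := multiply_ingredient ((PySem.List.pyGet? ingredients 0).getD dflt) i
              let ingredient_1 := multiply_ingredient ((PySem.List.pyGet? ingredients 1).getD dflt) j
              let ingredient_2 := multiply_ingredient ((PySem.List.pyGet? ingredients 2).getD dflt) k
              let ingredient_3 := multiply_ingredient ((PySem.List.pyGet? ingredients 3).getD dflt) l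
              let sc := score_ingredients [ingredient_0, ingredient_1, ingredient_2, ingredient_3]
              if cal_spec && sc.2 != 500 then best_score
              else if sc.1 > best_score then sc.1 else best_score)
            best_score)
        best_score)
    0

-- ===== PORT B =====
def pvGo (ingredients : List (String × Int × Int × Int × Int × Int)) (cal_spec : Bool)
    (idx : Nat) (remaining : Int)
    (capacity durability flavor texture calories best : Int) : Int :=
  let ing := (PySem.List.pyGet? ingredients idx).getD ("", 0, 0, 0, 0, 0)
  let c := ing.2.1
  let d := ing.2.2.1
  let f := ing.2.2.2.1
  let t := ing.2.2.2.2.1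
  let k := ing.2.2.2.2.2
  if h : idx ≥ 3 then
    let capacity2 := capacity + c * remaining
    let durability2 := durability + d * remaining
    let flavor2 := flavor + f * remaining
    let texture2 := texture + t * remaining
    let calories2 := calories + k * remaining
    if cal_spec && calories2 != 500 then best
    else
      let score := if capacity2 < 0 ∨ durability2 < 0 ∨ flavor2 < 0 ∨ texture2 < 0 then 0
                   else capacity2 * durability2 * flavor2 * texture2
      if score > best then score else best
  else
    (PySem.List.pyRange 0 (remaining + 1) 1).foldl
      (fun best amt =>
        pvGo ingredients cal_spec (idx + 1) (remaining - amt)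
          (capacity + c * amt) (durability + d * amt) (flavor + f * amt)
          (texture + t * amt) (calories + k * amt) best)
      best
termination_by 4 - idx
decreasing_by omega

def get_best_score_alt (ingredients : List (String × Int × Int × Int × Int × Int)) (cal_spec : Bool) : Int :=
  pvGo ingredients cal_spec 0 100 0 0 0 0 0 0

-- ===== PRECONDITION & SPEC =====
-- Pre_ excludes exactly the lists of fewer than 4 ingredients, on which A's ingredients[0..3] raises IndexError
def Pre_get_best_score (ingredients : List (String × Int × Int × Int × Int × Int)) (cal_spec : Bool) : Prop :=
  4 ≤ ingredients.length
instance (ingredients : List (String × Int × Int × Int × Int × Int)) (cal_spec : Bool) : Decidable (Pre_get_best_score ingredients cal_spec) := by unfold Pre_get_best_score; infer_instance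

def pvWitness_get_best_score : (List (String × Int × Int × Int × Int × Int)) × Bool :=
  ([("a", 1, 1, 1, 1, 1), ("b", 2, 0, -1, 1, 3), ("c", 0, 2, 1, -1, 8), ("d", -1, 0, 3, 1, 8)], false)

def Spec_get_best_score (ingredients : List (String × Int × Int × Int × Int × Int)) (cal_spec : Bool) (out : Int) : Prop := out = get_best_score_alt ingredients cal_spec
instance (ingredients : List (String × Int × Int × Int × Int × Int)) (cal_spec : Bool) (out : Int) : Decidable (Spec_get_best_score ingredients cal_spec out) := by unfold Spec_get_best_score; infer_instance

-- ===== CLAIM (what is proved, stated in full; the proofs are below) =====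
def Claim_equal_get_best_score : Prop := ∀ (ingredients : List (String × Int × Int × Int × Int × Int)) (cal_spec : Bool), Dom_get_best_score ingredients cal_spec → Pre_get_best_score ingredients cal_spec → Spec_get_best_score ingredients cal_spec (get_best_score ingredients cal_spec)

-- ===== LEMMAS AND PROOFS =====

theorem pvGo_last (ings : List (String × Int × Int × Int × Int × Int)) (cs : Bool)
    (r ca du fl te cal best : Int) :
    pvGo ings cs 3 r ca du fl te cal best =
      (let ing := (PySem.List.pyGet? ings 3).getD ("", 0, 0, 0, 0, 0)
       if cs && (cal + ing.2.2.2.2.2 * r != 500) then best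
       else
         let score := if ca + ing.2.1 * r < 0 ∨ du + ing.2.2.1 * r < 0 ∨
             fl + ing.2.2.2.1 * r < 0 ∨ te + ing.2.2.2.2.1 * r < 0 then 0
           else (ca + ing.2.1 * r) * (du + ing.2.2.1 * r) * (fl + ing.2.2.2.1 * r) *
             (te + ing.2.2.2.2.1 * r)
         if score > best then score else best) := by
  rw [pvGo]
  norm_num

theorem pvGo_step (ings : List (String × Int × Int × Int × Int × Int)) (cs : Bool)
    (idx : Nat) (h : idx < 3) (r ca du fl te cal best : Int) :
    pvGo ings cs idx r ca du fl te cal best =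
      (let ing := (PySem.List.pyGet? ings idx).getD ("", 0, 0, 0, 0, 0)
       (PySem.List.pyRange 0 (r + 1) 1).foldl
         (fun best amt =>
           pvGo ings cs (idx + 1) (r - amt)
             (ca + ing.2.1 * amt) (du + ing.2.2.1 * amt) (fl + ing.2.2.2.1 * amt)
             (te + ing.2.2.2.2.1 * amt) (cal + ing.2.2.2.2.2 * amt) best)
         best) := by
  rw [pvGo]
  rw [dif_neg (by omega)]

-- ===== VERDICT (by name: the statement is the Claim_ definition above) =====
theorem get_best_score_spec : Claim_equal_get_best_score := by
  intro ingredients cal_spec _hdom hpre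
  unfold Pre_get_best_score at hpre
  rcases ingredients with _ | ⟨t0, _ | ⟨t1, _ | ⟨t2, _ | ⟨t3, rest⟩⟩⟩⟩ <;>
    simp only [List.length_nil, List.length_cons] at hpre <;> try omega
  obtain ⟨n0, c0, d0, f0, x0, k0⟩ := t0
  obtain ⟨n1, c1, d1, f1, x1, k1⟩ := t1
  obtain ⟨n2, c2, d2, f2, x2, k2⟩ := t2
  obtain ⟨n3, c3, d3, f3, x3, k3⟩ := t3
  unfold Spec_get_best_score get_best_score get_best_score_alt
  rw [pvGo_step _ _ 0 (by omega)]
  simp only []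
  apply PySem.List.foldl_congr_mem
  intro b1 i _
  rw [pvGo_step _ _ 1 (by omega)]
  simp only []
  have e1 : (100 : Int) + 1 - i = 100 - i + 1 := by ring
  rw [e1]
  apply PySem.List.foldl_congr_mem
  intro b2 j _
  rw [pvGo_step _ _ 2 (by omega)]
  simp only []
  have e2 : (100 : Int) - i + 1 - j = 100 - i - j + 1 := by ring
  rw [e2]
  apply PySem.List.foldl_congr_mem
  intro b3 k _
  rw [pvGo_last]
  simp only [multiply_ingredient, score_ingredients, List.foldl]
  have g0 : PySem.List.pyGet? ((n0, c0, d0, f0, x0, k0) :: (n1, c1, d1, f1, x1, k1) ::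
      (n2, c2, d2, f2, x2, k2) :: (n3, c3, d3, f3, x3, k3) :: rest) (((0 : Nat) : Int)) =
      some (n0, c0, d0, f0, x0, k0) := by simp [pysem]
  have g1 : PySem.List.pyGet? ((n0, c0, d0, f0, x0, k0) :: (n1, c1, d1, f1, x1, k1) ::
      (n2, c2, d2, f2, x2, k2) :: (n3, c3, d3, f3, x3, k3) :: rest) (((1 : Nat) : Int)) =
      some (n1, c1, d1, f1, x1, k1) := by simp [pysem]
  have g2 : PySem.List.pyGet? ((n0, c0, d0, f0, x0, k0) :: (n1, c1, d1, f1, x1, k1) ::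
      (n2, c2, d2, f2, x2, k2) :: (n3, c3, d3, f3, x3, k3) :: rest) (((2 : Nat) : Int)) =
      some (n2, c2, d2, f2, x2, k2) := by simp [pysem]
  have g0' : PySem.List.pyGet? ((n0, c0, d0, f0, x0, k0) :: (n1, c1, d1, f1, x1, k1) ::
      (n2, c2, d2, f2, x2, k2) :: (n3, c3, d3, f3, x3, k3) :: rest) ((0 : Int)) =
      some (n0, c0, d0, f0, x0, k0) := by simp [pysem]
  have g1' : PySem.List.pyGet? ((n0, c0, d0, f0, x0, k0) :: (n1, c1, d1, f1, x1, k1) ::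
      (n2, c2, d2, f2, x2, k2) :: (n3, c3, d3, f3, x3, k3) :: rest) ((1 : Int)) =
      some (n1, c1, d1, f1, x1, k1) := by simp [pysem]
  have g2' : PySem.List.pyGet? ((n0, c0, d0, f0, x0, k0) :: (n1, c1, d1, f1, x1, k1) ::
      (n2, c2, d2, f2, x2, k2) :: (n3, c3, d3, f3, x3, k3) :: rest) ((2 : Int)) =
      some (n2, c2, d2, f2, x2, k2) := by simp [pysem]
  have g3' : PySem.List.pyGet? ((n0, c0, d0, f0, x0, k0) :: (n1, c1, d1, f1, x1, k1) ::
      (n2, c2, d2, f2, x2, k2) :: (n3, c3, d3, f3, x3, k3) :: rest) ((3 : Int)) =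
      some (n3, c3, d3, f3, x3, k3) := by simp [pysem]
  rw [g0, g1, g2, g0', g1', g2', g3']
  simp only [Option.getD_some]
  simp only [apply_ite Prod.snd, apply_ite Prod.fst, ite_self]
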